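-- pv_equiv track=rewrite | github.com/manwar/perlweeklychallenge-club | challenge-215/lubos-kolouch/python/ch-1.py | is_unsorted
-- ===== SOURCE A (Python) =====
-- def is_unsorted(word):
--     previous_char = word[0]
--
--     for i in range(1, len(word)):
--         current_char = word[i]
--         if current_char < previous_char:
--             return 1
--         previous_char = current_char
--
--     return 0
-- ===== SOURCE B (Python) =====
-- def is_unsorted(word):
--     return 1 if list(word) != sorted(word) else 0
-- ===== Notes on version B (the rewrite author's own statement) =====
-- stated objective: simpler
-- what changed: Replaced A's indexed adjacent-pair scan with a one-line sort-then-compare (list(word) != sorted(word)).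
-- outside the precondition, e.g. on is_unsorted(''): A raises IndexError, B returns 0
import Mathlib
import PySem

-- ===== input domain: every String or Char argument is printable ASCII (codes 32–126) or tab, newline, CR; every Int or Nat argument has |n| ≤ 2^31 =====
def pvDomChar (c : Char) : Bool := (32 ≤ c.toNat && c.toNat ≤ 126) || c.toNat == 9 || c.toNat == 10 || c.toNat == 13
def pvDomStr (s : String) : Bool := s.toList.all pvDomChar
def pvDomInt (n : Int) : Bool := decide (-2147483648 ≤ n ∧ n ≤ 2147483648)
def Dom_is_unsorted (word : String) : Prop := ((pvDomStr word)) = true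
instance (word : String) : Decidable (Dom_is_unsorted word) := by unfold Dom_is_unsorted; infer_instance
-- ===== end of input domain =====

-- B changes: sort-then-compare instead of A's adjacent-pair scan (objective: simpler one-liner; equivalence of the RETURN value on nonempty words).

-- ===== PORT A =====
-- the for-loop over range(1, len(word)) carrying previous_char; early 'return 1' becomes the 1-branch
def isUnsortedLoop (prev : Char) (cs : List Char) : Int :=
  match cs with
  | [] => 0
  | c :: rest => if c < prev then 1 else isUnsortedLoop c rest

def is_unsorted (word : String) : Int :=
  match word.toList with
  | [] => 0  -- unreachable under Pre_: Python raises IndexError at word[0]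
  | p :: rest => isUnsortedLoop p rest

-- ===== PORT B =====
def is_unsorted_alt (word : String) : Int :=
  if word.toList ≠ PySem.List.sorted word.toList (fun x => x) false then 1 else 0

-- ===== PRECONDITION & SPEC =====
-- Pre_ excludes only the empty string, on which A raises IndexError at word[0].
def Pre_is_unsorted (word : String) : Prop := word ≠ ""
instance (word : String) : Decidable (Pre_is_unsorted word) := by unfold Pre_is_unsorted; infer_instance
def pvWitness_is_unsorted : String := "ba"

def Spec_is_unsorted (word : String) (out : Int) : Prop := out = is_unsorted_alt word
instance (word : String) (out : Int) : Decidable (Spec_is_unsorted word out) := by unfold Spec_is_unsorted; infer_instance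

-- ===== CLAIM =====
def Claim_equal_is_unsorted : Prop := ∀ (word : String), Dom_is_unsorted word → Pre_is_unsorted word → Spec_is_unsorted word (is_unsorted word)

-- ===== LEMMAS AND PROOFS =====

theorem isUnsortedLoop_eq (cs : List Char) (prev : Char) :
    isUnsortedLoop prev cs = if (prev :: cs).Pairwise (· ≤ ·) then 0 else 1 := by
  induction cs generalizing prev with
  | nil => simp [isUnsortedLoop]
  | cons c rest ih =>
    simp only [isUnsortedLoop, ih]
    by_cases h : c < prev
    · have hnp : ¬ (prev :: c :: rest).Pairwise (· ≤ ·) := by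
        intro hp
        exact absurd ((List.pairwise_cons.mp hp).1 c (List.mem_cons_self)) (not_le.mpr h)
      simp [h, hnp]
    · have hle : prev ≤ c := not_lt.mp h
      have hiff : (prev :: c :: rest).Pairwise (· ≤ ·) ↔ (c :: rest).Pairwise (· ≤ ·) := by
        constructor
        · exact fun hp => (List.pairwise_cons.mp hp).2
        · intro hp
          refine List.pairwise_cons.mpr ⟨?_, hp⟩
          intro x hx
          rcases List.mem_cons.mp hx with rfl | hx
          · exact hle
          · exact le_trans hle (List.pairwise_cons.mp hp |>.1 x hx)
      by_cases hp : (c :: rest).Pairwise (· ≤ ·)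
      · simp [h, hp, hiff.mpr hp]
      · simp [h, hp, hiff]

theorem sorted_id_eq_self_iff (xs : List Char) :
    PySem.List.sorted xs (fun x => x) false = xs ↔ xs.Pairwise (· ≤ ·) := by
  constructor
  · intro h
    have hp := PySem.List.sorted_pairwise xs (fun x => x)
    rw [h] at hp
    exact hp
  · exact PySem.List.sorted_eq_self_of_pairwise xs (fun x => x)

-- ===== VERDICT =====
theorem is_unsorted_spec : Claim_equal_is_unsorted := by
  intro word _ hpre
  unfold Spec_is_unsorted is_unsorted is_unsorted_alt
  cases hw : word.toList with
  | nil =>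
    exact absurd (by simp_all : word = "") hpre
  | cons p rest =>
    show isUnsortedLoop p rest = _
    rw [isUnsortedLoop_eq]
    by_cases hp : (p :: rest).Pairwise (· ≤ ·)
    · have hs : PySem.List.sorted (p :: rest) (fun x => x) false = p :: rest :=
        (sorted_id_eq_self_iff _).mpr hp
      simp [hp, hs]
    · have hs : PySem.List.sorted (p :: rest) (fun x => x) false ≠ p :: rest :=
        fun he => hp ((sorted_id_eq_self_iff _).mp he)
      simp [hp, Ne.symm hs]
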